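-- pv_equiv track=rewrite | github.com/hexagonbio/geneML | gene_ml/main.py | reorder_contigs
-- ===== SOURCE A (Python) =====
-- def reorder_contigs(contigs, num_cores):
--     """
--     Reorders contigs by size to balance the workload across processes.
--     """
--     contigs_by_size = sorted(contigs.items(), key=lambda x: len(x[1]), reverse=False)
--     if len(contigs_by_size) < num_cores * 2:
--         return contigs_by_size
--
--     reordered_contigs = []
--     num_groups = max(num_cores, 8)
--     offset = len(contigs_by_size) // num_groups + 1
--     for i in range(offset):
--         for j in range(0, len(contigs_by_size), offset):
--             if j + i < len(contigs_by_size):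
--                 reordered_contigs.append(contigs_by_size[j + i])
--     assert len(reordered_contigs) == len(contigs_by_size), f'failed to reorder contigs, {len(reordered_contigs)} != {len(contigs_by_size)}'
--     return reordered_contigs
-- ===== SOURCE B (Python) =====
-- import itertools
--
--
-- def reorder_contigs(contigs, num_cores):
--     """
--     Reorders contigs by size to balance the workload across processes.
--     Same result as before, but via chunk-and-transpose instead of index arithmetic.
--     """
--     contigs_by_size = sorted(contigs.items(), key=lambda x: len(x[1]), reverse=False)
--     if len(contigs_by_size) < num_cores * 2:
--         return contigs_by_size
--
--     offset = len(contigs_by_size) // max(num_cores, 8) + 1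
--     rows = [contigs_by_size[r:r + offset] for r in range(0, len(contigs_by_size), offset)]
--     _fill = object()
--     return [x for col in itertools.zip_longest(*rows, fillvalue=_fill)
--             for x in col if x is not _fill]
-- ===== Notes on version B (the rewrite author's own statement) =====
-- stated objective: alternative
-- what changed: The index-arithmetic double loop over (i, j) is replaced by splitting the sorted list into consecutive chunks of length offset and transposing them column by column with itertools.zip_longest (unique sentinel filtered by identity), keeping the sort and the early-return guard.
import Mathlib
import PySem

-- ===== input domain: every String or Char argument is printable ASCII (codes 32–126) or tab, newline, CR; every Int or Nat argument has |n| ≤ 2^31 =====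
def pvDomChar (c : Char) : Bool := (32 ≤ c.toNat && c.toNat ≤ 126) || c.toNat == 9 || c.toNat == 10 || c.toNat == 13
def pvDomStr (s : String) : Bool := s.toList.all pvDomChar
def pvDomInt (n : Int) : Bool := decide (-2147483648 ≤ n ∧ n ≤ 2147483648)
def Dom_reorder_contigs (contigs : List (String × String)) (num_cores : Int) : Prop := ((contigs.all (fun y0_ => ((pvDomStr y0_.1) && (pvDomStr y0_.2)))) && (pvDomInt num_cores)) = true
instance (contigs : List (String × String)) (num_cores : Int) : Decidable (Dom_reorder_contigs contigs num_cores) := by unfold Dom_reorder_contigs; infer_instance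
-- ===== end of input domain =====

-- B replaces A's index-arithmetic double loop by chunking the sorted list and transposing
-- column by column (zip_longest); same result, alternative decomposition (no speed claim).

-- ===== PORT A =====
-- `contigs` is a Python dict: the association list is read through dict semantics (Dict.ofList,
-- last value wins, first position kept), then `.items()` in insertion order.
-- The guarded `contigs_by_size[j + i]` is in range when appended, so `(pyGet? …).toList` is exact.
-- The final `assert` always holds (it compares lengths of the value returned), so it is a no-op.
def reorder_contigs (contigs : List (String × String)) (num_cores : Int) : List (String × String) :=
  let contigs_by_size :=
    PySem.List.sorted (PySem.Dict.ofList contigs).items (fun x => PySem.Str.len x.2) false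
  if (contigs_by_size.length : Int) < num_cores * 2 then contigs_by_size
  else
    let num_groups : Int := max num_cores 8
    let offset : Int := PySem.Int.floordiv (contigs_by_size.length : Int) num_groups + 1
    (PySem.List.pyRange 0 offset 1).foldl (fun acc i =>
      (PySem.List.pyRange 0 (contigs_by_size.length : Int) offset).foldl (fun acc j =>
        if j + i < (contigs_by_size.length : Int) then
          acc ++ (PySem.List.pyGet? contigs_by_size (j + i)).toList
        else acc) acc) []

-- ===== PORT B =====
-- zip_longest(*rows, fillvalue=sentinel) with the sentinel filtered out by identity reads the
-- rows column by column up to the longest row; ported as: for i < max row length, collect the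
-- i-th element of every row that has one.
def reorder_contigs_alt (contigs : List (String × String)) (num_cores : Int) : List (String × String) :=
  let contigs_by_size :=
    PySem.List.sorted (PySem.Dict.ofList contigs).items (fun x => PySem.Str.len x.2) false
  if (contigs_by_size.length : Int) < num_cores * 2 then contigs_by_size
  else
    let offset : Int :=
      PySem.Int.floordiv (contigs_by_size.length : Int) (max num_cores 8) + 1
    let rows := (PySem.List.pyRange 0 (contigs_by_size.length : Int) offset).map
      (fun r => PySem.List.slice contigs_by_size (some r) (some (r + offset)))
    let m := rows.foldl (fun a row => max a row.length) 0
    (List.range m).flatMap (fun i => rows.filterMap (fun row => row[i]?))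

-- ===== PRECONDITION & SPEC =====
def Spec_reorder_contigs (contigs : List (String × String)) (num_cores : Int) (out : List (String × String)) : Prop := out = reorder_contigs_alt contigs num_cores
instance (contigs : List (String × String)) (num_cores : Int) (out : List (String × String)) : Decidable (Spec_reorder_contigs contigs num_cores out) := by unfold Spec_reorder_contigs; infer_instance

-- ===== CLAIM (what is proved, stated in full; the proofs are below) =====
def Claim_equal_reorder_contigs : Prop := ∀ (contigs : List (String × String)) (num_cores : Int), Dom_reorder_contigs contigs num_cores → Spec_reorder_contigs contigs num_cores (reorder_contigs contigs num_cores)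

-- ===== LEMMAS AND PROOFS =====

theorem pv_filterMap_eq_flatMap {α β : Type} (f : α → Option β) (l : List α) :
    l.filterMap f = l.flatMap (fun a => (f a).toList) := by
  induction l with
  | nil => rfl
  | cons x xs ih =>
    cases h : f x <;> simp [h, ih]

theorem pv_foldl_max_le {α : Type} (len : α → Nat) (c : Nat) :
    ∀ (rows : List α) (a : Nat), (∀ r ∈ rows, len r ≤ c) → a ≤ c →
      rows.foldl (fun a r => max a (len r)) a ≤ c := by
  intro rows
  induction rows with
  | nil => intro a _ ha; simpa using ha
  | cons r rs ih =>
    intro a h ha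
    exact ih _ (fun x hx => h x (List.mem_cons_of_mem _ hx))
      (max_le ha (h r (List.mem_cons_self)))

theorem pv_foldl_max_ge_init {α : Type} (len : α → Nat) :
    ∀ (rows : List α) (a : Nat), a ≤ rows.foldl (fun a r => max a (len r)) a := by
  intro rows
  induction rows with
  | nil => intro a; exact le_refl a
  | cons x xs ih => intro a; exact le_trans (le_max_left _ _) (ih (max a (len x)))

theorem pv_le_foldl_max {α : Type} (len : α → Nat) :
    ∀ (rows : List α) (a : Nat) (r : α), r ∈ rows →
      len r ≤ rows.foldl (fun a r => max a (len r)) a := by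
  intro rows
  induction rows with
  | nil => intro a r h; simp at h
  | cons x xs ih =>
    intro a r h
    rcases List.mem_cons.mp h with h | h
    · subst h
      exact le_trans (le_max_right a (len r)) (pv_foldl_max_ge_init len xs (max a (len r)))
    · exact ih _ r h

-- the core combinatorial fact, over an arbitrary list and a positive Nat offset
theorem pv_core {α : Type} (xs : List α) (off : Nat) (hoff : 0 < off) :
    (PySem.List.pyRange 0 ((off : Nat) : Int) 1).foldl (fun acc i =>
      (PySem.List.pyRange 0 (xs.length : Int) ((off : Nat) : Int)).foldl (fun acc j =>
        if j + i < (xs.length : Int) then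
          acc ++ (PySem.List.pyGet? xs (j + i)).toList
        else acc) acc) []
    =
    (List.range (((PySem.List.pyRange 0 (xs.length : Int) ((off : Nat) : Int)).map
        (fun r => PySem.List.slice xs (some r) (some (r + ((off : Nat) : Int))))).foldl
          (fun a row => max a row.length) 0)).flatMap
      (fun i => ((PySem.List.pyRange 0 (xs.length : Int) ((off : Nat) : Int)).map
        (fun r => PySem.List.slice xs (some r) (some (r + ((off : Nat) : Int))))).filterMap
          (fun row => row[i]?)) := by
  have hoffI : (0 : Int) < ((off : Nat) : Int) := by exact_mod_cast hoff
  -- the stepped range is a mapped List.range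
  obtain ⟨Q, hQ⟩ : ∃ Q, PySem.List.pyRange 0 (xs.length : Int) ((off : Nat) : Int)
      = (List.range Q).map (fun k => ((off * k : Nat) : Int)) := by
    refine ⟨if (0 : Int) < (xs.length : Int) then
      (((xs.length : Int) - 0 + ((off : Nat) : Int) - 1) / ((off : Nat) : Int)).toNat else 0, ?_⟩
    rw [PySem.List.pyRange_of_pos _ _ hoffI]
    congr 1
    funext k
    push_cast
    ring
  rw [hQ]
  -- the slices are take/drop chunks
  have hrows : ((List.range Q).map (fun k => ((off * k : Nat) : Int))).map
      (fun r => PySem.List.slice xs (some r) (some (r + ((off : Nat) : Int))))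
      = (List.range Q).map (fun k => (xs.drop (off * k)).take off) := by
    rw [List.map_map]
    apply List.map_congr_left
    intro k _
    simp only [Function.comp]
    exact PySem.List.slice_natCast_add xs (off * k) off
  rw [hrows]
  set m := ((List.range Q).map (fun k => (xs.drop (off * k)).take off)).foldl
      (fun a row => max a row.length) 0 with hm
  have hrowbound : ∀ row ∈ (List.range Q).map (fun k => (xs.drop (off * k)).take off),
      row.length ≤ off := by
    intro row hrow
    obtain ⟨k, _, hk⟩ := List.mem_map.mp hrow
    rw [← hk]
    simp
  have hmle : m ≤ off := pv_foldl_max_le List.length off _ 0 hrowbound (Nat.zero_le _)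
  have hrowlen_le_m : ∀ k, k < Q → ((xs.drop (off * k)).take off).length ≤ m := by
    intro k hk
    exact pv_le_foldl_max List.length _ 0 _
      (List.mem_map.mpr ⟨k, List.mem_range.mpr hk, rfl⟩)
  -- pointwise value of the guarded indexed append
  have hpoint : ∀ (i : Nat) (acc : List α) (k : Nat), k ∈ List.range Q →
      (if ((off * k : Nat) : Int) + (i : Int) < (xs.length : Int) then
        acc ++ (PySem.List.pyGet? xs (((off * k : Nat) : Int) + (i : Int))).toList
      else acc) = acc ++ (xs[off * k + i]?).toList := by
    intro i acc k _
    have hc : ((off * k : Nat) : Int) + (i : Int) = ((off * k + i : Nat) : Int) := by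
      push_cast; ring
    rw [hc, PySem.List.pyGet?_natCast]
    by_cases h : off * k + i < xs.length
    · rw [if_pos (by exact_mod_cast h)]
    · rw [if_neg (by exact_mod_cast h), List.getElem?_eq_none (by omega)]
      simp
  -- the A-side inner loop is the i-th column
  have hstep : ∀ (acc : List α) (i : Nat), i ∈ List.range off →
      ((List.range Q).map (fun k => ((off * k : Nat) : Int))).foldl (fun acc j =>
        if j + (i : Int) < (xs.length : Int) then
          acc ++ (PySem.List.pyGet? xs (j + (i : Int))).toList
        else acc) acc
      = acc ++ (List.range Q).flatMap (fun k => (xs[off * k + i]?).toList) := by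
    intro acc i _
    rw [List.foldl_map]
    exact Eq.trans (PySem.List.foldl_congr_mem _ _ _ _ (hpoint i))
      (PySem.List.foldl_append_eq_flatMap _ _ _)
  rw [PySem.List.pyRange_zero_natCast off, List.foldl_map]
  trans ((List.range off).flatMap (fun i =>
    (List.range Q).flatMap (fun k => (xs[off * k + i]?).toList)))
  · refine Eq.trans (PySem.List.foldl_congr_mem _ _ _ _ hstep) ?_
    simpa using PySem.List.foldl_append_eq_flatMap
      (fun i => (List.range Q).flatMap (fun k => (xs[off * k + i]?).toList))
      (List.range off) []
  -- the B-side column for i < off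
  have hcol : ∀ i : Nat, i < off →
      ((List.range Q).map (fun k => (xs.drop (off * k)).take off)).filterMap
        (fun row => row[i]?)
      = (List.range Q).flatMap (fun k => (xs[off * k + i]?).toList) := by
    intro i hi
    rw [List.filterMap_map, pv_filterMap_eq_flatMap]
    apply List.flatMap_congr
    intro k _
    simp only [Function.comp]
    rw [List.getElem?_take, if_pos hi, List.getElem?_drop]
  have hrhs : (List.range m).flatMap (fun i =>
      ((List.range Q).map (fun k => (xs.drop (off * k)).take off)).filterMap
        (fun row => row[i]?))
      = (List.range m).flatMap (fun i =>
        (List.range Q).flatMap (fun k => (xs[off * k + i]?).toList)) := by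
    apply List.flatMap_congr
    intro i hi
    exact hcol i (lt_of_lt_of_le (List.mem_range.mp hi) hmle)
  rw [hrhs]
  -- columns at or beyond the longest row are empty
  have hempty : ∀ i : Nat, m ≤ i → i < off →
      (List.range Q).flatMap (fun k => (xs[off * k + i]?).toList) = [] := by
    intro i him hio
    have : ∀ k ∈ List.range Q, (xs[off * k + i]?).toList = ([] : List α) := by
      intro k hk
      cases hsome : xs[off * k + i]? with
      | none => simp
      | some v =>
        exfalso
        have hlt : off * k + i < xs.length := by
          have := List.getElem?_eq_some_iff.mp hsome
          exact this.1
        have hlen : ((xs.drop (off * k)).take off).length = min off (xs.length - off * k) := by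
          simp
        have hi2 : i < ((xs.drop (off * k)).take off).length := by
          rw [hlen]; omega
        have := hrowlen_le_m k (List.mem_range.mp hk)
        omega
    rw [List.flatMap_congr this]
    simp
  rw [show List.range off = List.range (m + (off - m)) from by
      rw [Nat.add_sub_cancel' hmle],
    List.range_add, List.flatMap_append]
  have htail : ((List.range (off - m)).map (fun j => m + j)).flatMap
      (fun i => (List.range Q).flatMap (fun k => (xs[off * k + i]?).toList)) = [] := by
    rw [List.flatMap_map]
    have hall : ∀ j ∈ List.range (off - m),
        (List.range Q).flatMap (fun k => (xs[off * k + (m + j)]?).toList) = ([] : List α) := by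
      intro j hj
      have hj' := List.mem_range.mp hj
      exact hempty (m + j) (Nat.le_add_right _ _) (by omega)
    exact (List.flatMap_congr hall).trans (by simp)
  rw [htail, List.append_nil]

-- ===== VERDICT (by name: the statement is the Claim_ definition above) =====
theorem reorder_contigs_spec : Claim_equal_reorder_contigs := by
  intro contigs num_cores _
  unfold Spec_reorder_contigs reorder_contigs reorder_contigs_alt
  set cbs := PySem.List.sorted (PySem.Dict.ofList contigs).items (fun x => PySem.Str.len x.2) false with hcbs
  by_cases hguard : (cbs.length : Int) < num_cores * 2
  · simp [hguard]
  · simp only [hguard, if_false]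
    have hg : (0 : Int) < max num_cores 8 := lt_of_lt_of_le (by norm_num) (le_max_right _ _)
    have hoffeq : PySem.Int.floordiv (cbs.length : Int) (max num_cores 8) + 1
        = ((cbs.length / (max num_cores 8).toNat + 1 : Nat) : Int) := by
      rw [PySem.Int.floordiv_eq_ediv_of_pos hg]
      push_cast [Int.toNat_of_nonneg hg.le]
      rfl
    rw [hoffeq]
    exact pv_core cbs (cbs.length / (max num_cores 8).toNat + 1) (Nat.succ_pos _)
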